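-- pv_equiv track=rewrite | github.com/JTibs18/LeetCode | PathCrossing.py | pathCrossing
-- ===== SOURCE A (Python) =====
-- def pathCrossing(path):
--     location = [0, 0]
--     travelled = set()
--     travelled.add(tuple(location))
--     for index, value in enumerate(path):
--         if (value == "N"):
--             location[1] += 1
--         elif (value == "S"):
--             location[1] -= 1
--         elif (value == "E"):
--             location[0] += 1
--         elif (value == "W"):
--             location[0] -= 1
--         if (tuple(location) in travelled):
--             return True
--         else:
--             travelled.add(tuple(location))
--     return False
-- ===== SOURCE B (Python) =====
-- def pathCrossing(path):
--     # A coordinate is revisited iff some nonempty contiguous segment of moves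
--     # has zero net displacement; scan all segments, summing deltas (no visited set).
--     deltas = {"N": (0, 1), "S": (0, -1), "E": (1, 0), "W": (-1, 0)}
--     n = len(path)
--     for i in range(n):
--         dx, dy = 0, 0
--         for j in range(i, n):
--             ddx, ddy = deltas.get(path[j], (0, 0))
--             dx += ddx
--             dy += ddy
--             if dx == 0 and dy == 0:
--                 return True
--     return False
-- ===== Notes on version B (the rewrite author's own statement) =====
-- stated objective: alternative
-- what changed: A simulates the walk once maintaining a set of visited coordinates; B uses no set and no simulated positions at all: it scans every nonempty contiguous segment of moves and returns True iff some segment has zero net displacement, which holds exactly when the walk revisits a coordinate.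
import Mathlib
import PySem

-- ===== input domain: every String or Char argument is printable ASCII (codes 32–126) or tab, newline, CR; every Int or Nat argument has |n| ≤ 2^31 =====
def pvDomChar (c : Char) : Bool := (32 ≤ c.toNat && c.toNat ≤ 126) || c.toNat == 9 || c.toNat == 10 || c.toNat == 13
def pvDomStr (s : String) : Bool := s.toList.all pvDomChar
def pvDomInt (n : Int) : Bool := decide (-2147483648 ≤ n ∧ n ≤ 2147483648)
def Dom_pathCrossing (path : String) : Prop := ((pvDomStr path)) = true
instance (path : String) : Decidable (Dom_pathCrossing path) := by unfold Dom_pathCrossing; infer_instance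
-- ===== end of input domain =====

-- B drops A's visited set entirely: it scans every nonempty contiguous segment of
-- moves and answers whether some segment has zero net displacement (alternative
-- algorithm; quadratic instead of A's single pass, not claimed faster).

-- ===== PORT A =====
def pvStepA (loc : Int × Int) (c : Char) : Int × Int :=
  if c = 'N' then (loc.1, loc.2 + 1)
  else if c = 'S' then (loc.1, loc.2 - 1)
  else if c = 'E' then (loc.1 + 1, loc.2)
  else if c = 'W' then (loc.1 - 1, loc.2)
  else loc

def pathCrossingGo (loc : Int × Int) (travelled : PySem.Set (Int × Int)) :
    List Char → Bool
  | [] => false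
  | c :: rest =>
    let loc' := pvStepA loc c
    if PySem.Set.contains travelled loc' then true
    else pathCrossingGo loc' (PySem.Set.add travelled loc') rest

def pathCrossing (path : String) : Bool :=
  pathCrossingGo ((0 : Int), (0 : Int))
    (PySem.Set.add PySem.Set.empty ((0 : Int), (0 : Int))) path.toList

-- ===== PORT B =====
def pvDeltas : PySem.Dict Char (Int × Int) :=
  PySem.Dict.ofList [('N', ((0 : Int), (1 : Int))), ('S', (0, -1)), ('E', (1, 0)), ('W', (-1, 0))]

-- inner loop: j from i to n, accumulating (dx, dy), early return on (0, 0)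
def pvInnerB (dx dy : Int) : List Char → Bool
  | [] => false
  | c :: rest =>
    let d := PySem.Dict.getD pvDeltas c ((0 : Int), (0 : Int))
    let dx' := dx + d.1
    let dy' := dy + d.2
    if dx' = 0 ∧ dy' = 0 then true else pvInnerB dx' dy' rest

-- outer loop: i from 0 to n, each start scans the suffix path[i:]
def pvOuterB : List Char → Bool
  | [] => false
  | c :: rest => if pvInnerB 0 0 (c :: rest) then true else pvOuterB rest

def pathCrossing_alt (path : String) : Bool := pvOuterB path.toList

-- ===== PRECONDITION & SPEC =====
def Spec_pathCrossing (path : String) (out : Bool) : Prop := out = pathCrossing_alt path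
instance (path : String) (out : Bool) : Decidable (Spec_pathCrossing path out) := by unfold Spec_pathCrossing; infer_instance

-- ===== CLAIM (what is proved, stated in full; the proofs are below) =====
def Claim_equal_pathCrossing : Prop := ∀ (path : String), Dom_pathCrossing path → Spec_pathCrossing path (pathCrossing path)

-- ===== LEMMAS AND PROOFS =====

-- The sequence of positions visited after loc, along cs.
def pvTail (loc : Int × Int) : List Char → List (Int × Int)
  | [] => []
  | c :: cs => pvStepA loc c :: pvTail (pvStepA loc c) cs

-- B's delta step agrees with A's branch step.
theorem pvStep_eq (loc : Int × Int) (c : Char) :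
    (loc.1 + (PySem.Dict.getD pvDeltas c ((0 : Int), (0 : Int))).1,
     loc.2 + (PySem.Dict.getD pvDeltas c ((0 : Int), (0 : Int))).2) = pvStepA loc c := by
  by_cases hN : c = 'N'
  · subst hN
    have hd : PySem.Dict.getD pvDeltas 'N' ((0 : Int), (0 : Int)) = ((0 : Int), (1 : Int)) := by
      decide
    simp [pvStepA, hd]
  by_cases hS : c = 'S'
  · subst hS
    have hd : PySem.Dict.getD pvDeltas 'S' ((0 : Int), (0 : Int)) = ((0 : Int), (-1 : Int)) := by
      decide
    simp [pvStepA, hd, Int.sub_eq_add_neg]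
  by_cases hE : c = 'E'
  · subst hE
    have hd : PySem.Dict.getD pvDeltas 'E' ((0 : Int), (0 : Int)) = ((1 : Int), (0 : Int)) := by
      decide
    simp [pvStepA, hd]
  by_cases hW : c = 'W'
  · subst hW
    have hd : PySem.Dict.getD pvDeltas 'W' ((0 : Int), (0 : Int)) = ((-1 : Int), (0 : Int)) := by
      decide
    simp [pvStepA, hd, Int.sub_eq_add_neg]
  have hN' : ('N' == c) = false := beq_eq_false_iff_ne.mpr (Ne.symm hN)
  have hS' : ('S' == c) = false := beq_eq_false_iff_ne.mpr (Ne.symm hS)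
  have hE' : ('E' == c) = false := beq_eq_false_iff_ne.mpr (Ne.symm hE)
  have hW' : ('W' == c) = false := beq_eq_false_iff_ne.mpr (Ne.symm hW)
  have hitems : pvDeltas.items
      = [('N', ((0 : Int), (1 : Int))), ('S', (0, -1)), ('E', (1, 0)), ('W', (-1, 0))] := by
    decide
  have hd : PySem.Dict.getD pvDeltas c ((0 : Int), (0 : Int)) = ((0 : Int), (0 : Int)) := by
    simp [PySem.Dict.getD, PySem.Dict.get?, hitems, List.find?, hN', hS', hE', hW']
  simp [pvStepA, hd, hN, hS, hE, hW]

-- A's early-exit scan over a nodup prefix answers: does the full sequence repeat?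
theorem goA_eq (cs : List Char) : ∀ (loc : Int × Int) (prev : List (Int × Int)),
    prev.Nodup →
    pathCrossingGo loc prev cs = decide ¬ (prev ++ pvTail loc cs).Nodup := by
  induction cs with
  | nil =>
    intro loc prev h
    simp [pathCrossingGo, pvTail, h]
  | cons c cs ih =>
    intro loc prev h
    by_cases hmem : pvStepA loc c ∈ prev
    · have hc : PySem.Set.contains prev (pvStepA loc c) = true := by
        simp [PySem.Set.contains_eq_listContains]
        exact hmem
      have hnd : ¬ (prev ++ pvStepA loc c :: pvTail (pvStepA loc c) cs).Nodup := by
        intro hnd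
        rcases List.nodup_append.mp hnd with ⟨_, _, hdis⟩
        exact hdis _ hmem _ (by simp) rfl
      simp [pathCrossingGo, pvTail, hnd]
      exact Or.inl hmem
    · have hc : PySem.Set.contains prev (pvStepA loc c) = false := by
        simp [PySem.Set.contains_eq_listContains]
        exact hmem
      have hadd : PySem.Set.add prev (pvStepA loc c) = prev ++ [pvStepA loc c] := by
        simp [PySem.Set.add, PySem.Set.contains_eq_listContains]
        exact hmem
      have h' : (prev ++ [pvStepA loc c]).Nodup := by
        refine List.nodup_append.mpr ⟨h, List.nodup_singleton _, ?_⟩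
        intro a ha b hb
        simp at hb
        subst hb
        exact fun he => hmem (he ▸ ha)
      calc pathCrossingGo loc prev (c :: cs)
          = pathCrossingGo (pvStepA loc c) (prev ++ [pvStepA loc c]) cs := by
            simp [pathCrossingGo, hmem]
        _ = decide ¬ ((prev ++ [pvStepA loc c]) ++ pvTail (pvStepA loc c) cs).Nodup :=
            ih _ _ h'
        _ = decide ¬ (prev ++ pvTail loc (c :: cs)).Nodup := by
            simp [pvTail, List.append_assoc]

-- The walk is translation-equivariant.
theorem pvStepA_shift (a b : Int) (p : Int × Int) (c : Char) :
    pvStepA (p.1 + a, p.2 + b) c = ((pvStepA p c).1 + a, (pvStepA p c).2 + b) := by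
  simp only [pvStepA]
  split_ifs <;> simp <;> ring

theorem pvTail_shift (cs : List Char) : ∀ (a b : Int) (p : Int × Int),
    pvTail (p.1 + a, p.2 + b) cs = (pvTail p cs).map (fun q => (q.1 + a, q.2 + b)) := by
  induction cs with
  | nil => intro a b p; simp [pvTail]
  | cons c cs ih =>
    intro a b p
    simp only [pvTail, pvStepA_shift, List.map_cons]
    exact congrArg _ (ih a b (pvStepA p c))

-- B's inner loop from (dx, dy) answers: does the walk from (dx, dy) reach (0, 0)?
theorem innerB_eq (cs : List Char) : ∀ (dx dy : Int),
    pvInnerB dx dy cs = decide (((0 : Int), (0 : Int)) ∈ pvTail (dx, dy) cs) := by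
  induction cs with
  | nil => intro dx dy; simp [pvInnerB, pvTail]
  | cons c cs ih =>
    intro dx dy
    have hstep := pvStep_eq (dx, dy) c
    have h1 : dx + (PySem.Dict.getD pvDeltas c ((0 : Int), (0 : Int))).1
        = (pvStepA (dx, dy) c).1 := congrArg Prod.fst hstep
    have h2 : dy + (PySem.Dict.getD pvDeltas c ((0 : Int), (0 : Int))).2
        = (pvStepA (dx, dy) c).2 := congrArg Prod.snd hstep
    simp only [pvInnerB, pvTail, h1, h2, ih]
    by_cases h0 : pvStepA (dx, dy) c = ((0 : Int), (0 : Int))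
    · have hc : (pvStepA (dx, dy) c).1 = 0 ∧ (pvStepA (dx, dy) c).2 = 0 := by
        rw [h0]; exact ⟨rfl, rfl⟩
      simp [h0]
    · have hne : ¬ ((pvStepA (dx, dy) c).1 = 0 ∧ (pvStepA (dx, dy) c).2 = 0) := by
        intro ⟨ha, hb⟩
        exact h0 (Prod.ext ha hb)
      simp [hne, List.mem_cons, Ne.symm h0]

-- Reaching (0, 0) from (0, 0) is reaching loc from loc.
theorem zero_mem_iff (cs : List Char) (loc : Int × Int) :
    (((0 : Int), (0 : Int)) ∈ pvTail ((0 : Int), (0 : Int)) cs) ↔ loc ∈ pvTail loc cs := by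
  have h := pvTail_shift cs loc.1 loc.2 ((0 : Int), (0 : Int))
  simp only [zero_add] at h
  constructor
  · intro hm
    have hx : (loc.1, loc.2) ∈ pvTail (loc.1, loc.2) cs := by
      rw [h]
      exact List.mem_map.mpr ⟨((0 : Int), (0 : Int)), hm, by simp⟩
    simpa using hx
  · intro hm
    have hx : (loc.1, loc.2) ∈ pvTail (loc.1, loc.2) cs := by simpa using hm
    rw [h] at hx
    rcases List.mem_map.mp hx with ⟨q, hq, he⟩
    have h1 : q.1 = 0 := by
      have := congrArg Prod.fst he; simp at this; omega
    have h2 : q.2 = 0 := by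
      have := congrArg Prod.snd he; simp at this; omega
    have hq0 : q = ((0 : Int), (0 : Int)) := Prod.ext h1 h2
    exact hq0 ▸ hq

-- B's outer loop answers: does the positions list (starting at loc) repeat?
theorem outerB_eq (cs : List Char) : ∀ (loc : Int × Int),
    pvOuterB cs = decide ¬ (loc :: pvTail loc cs).Nodup := by
  induction cs with
  | nil => intro loc; simp [pvOuterB, pvTail]
  | cons c cs ih =>
    intro loc
    have hz : decide (((0 : Int), (0 : Int)) ∈ pvTail ((0 : Int), (0 : Int)) (c :: cs))
        = decide (loc ∈ pvTail loc (c :: cs)) := by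
      simp only [decide_eq_decide]
      exact zero_mem_iff _ _
    simp only [pvOuterB, innerB_eq (c :: cs) 0 0, hz, ih (pvStepA loc c)]
    by_cases hm : loc ∈ pvTail loc (c :: cs)
    · have : ¬ (loc :: pvTail loc (c :: cs)).Nodup := by
        simp [List.nodup_cons, hm]
      simp [hm, this]
    · have hsplit : (loc :: pvTail loc (c :: cs)).Nodup ↔
          (pvStepA loc c :: pvTail (pvStepA loc c) cs).Nodup := by
        rw [show pvTail loc (c :: cs) = pvStepA loc c :: pvTail (pvStepA loc c) cs from rfl]
          at hm ⊢
        simp [List.nodup_cons, hm]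
      simp [hm, hsplit]

-- ===== VERDICT (by name: the statement is the Claim_ definition above) =====
theorem pathCrossing_spec : Claim_equal_pathCrossing := by
  intro path _
  unfold Spec_pathCrossing pathCrossing pathCrossing_alt
  rw [show (PySem.Set.add PySem.Set.empty ((0 : Int), (0 : Int)))
      = [((0 : Int), (0 : Int))] from rfl]
  rw [goA_eq path.toList ((0 : Int), (0 : Int)) [((0 : Int), (0 : Int))]
      (List.nodup_singleton _)]
  rw [outerB_eq path.toList ((0 : Int), (0 : Int))]
  rfl
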